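-- pv_equiv track=rewrite | github.com/SevenThRe/docapi-tools | scripts/analyze_code.py | _deduplicate_params
-- ===== SOURCE A (Python) =====
-- from typing import Dict, List, Optional, Tuple
--
-- def _deduplicate_params(params: List[Dict]) -> List[Dict]:
--     """同名パラメーターを信頼度優先でマージ"""
--     seen = {}
--     priority = {"HIGH": 0, "MEDIUM": 1, "LOW": 2, "UNKNOWN": 3}
--     for p in params:
--         name = p["name"]
--         if name not in seen or priority.get(p["confidence"], 3) < priority.get(seen[name]["confidence"], 3):
--             seen[name] = p
--     return list(seen.values())
-- ===== SOURCE B (Python) =====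
-- from typing import Dict, List
--
--
-- def _deduplicate_params(params: List[Dict]) -> List[Dict]:
--     """Group params by name first, then reduce each group to its best-confidence
--     entry (min returns the first minimum, matching the keep-first tie rule)."""
--     priority = {"HIGH": 0, "MEDIUM": 1, "LOW": 2, "UNKNOWN": 3}
--     groups = {}
--     order = []
--     for p in params:
--         name = p["name"]
--         if name in groups:
--             groups[name].append(p)
--         else:
--             groups[name] = [p]
--             order.append(name)
--     return [min(groups[name], key=lambda p: priority.get(p.get("confidence"), 3))
--             for name in order]
-- ===== Notes on version B (the rewrite author's own statement) =====
-- stated objective: alternative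
-- what changed: Replaces the single-pass running-best dict with a two-phase group-then-reduce: one pass builds name->list-of-params groups plus a first-appearance order list, a second pass takes min(group, key=priority) for each name in order.
import Mathlib
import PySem

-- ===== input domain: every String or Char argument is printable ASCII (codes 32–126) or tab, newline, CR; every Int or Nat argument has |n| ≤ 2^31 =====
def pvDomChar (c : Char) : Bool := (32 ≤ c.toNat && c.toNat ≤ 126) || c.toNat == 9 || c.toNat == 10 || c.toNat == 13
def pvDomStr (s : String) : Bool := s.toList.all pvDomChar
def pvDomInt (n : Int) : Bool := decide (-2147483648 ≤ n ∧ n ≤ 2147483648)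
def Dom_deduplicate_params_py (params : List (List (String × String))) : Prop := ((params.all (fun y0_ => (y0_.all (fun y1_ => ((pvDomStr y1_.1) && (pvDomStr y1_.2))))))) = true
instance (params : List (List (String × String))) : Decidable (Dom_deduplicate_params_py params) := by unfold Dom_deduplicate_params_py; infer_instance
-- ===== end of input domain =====

-- B replaces A's single-pass running-best dict with a two-phase group-by-name then
-- reduce-each-group-by-min scheme (alternative decomposition, same
-- cost). Where Python A raises KeyError (outside Pre_ below), Python B's .get-based reduce
-- still returns a value; that is stated in the claim, not proved here.

-- ===== PORT A =====
-- the priority table (shared literal constant of both Pythons)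
def pvPriority : PySem.Dict String Int :=
  PySem.Dict.ofList [("HIGH", 0), ("MEDIUM", 1), ("LOW", 2), ("UNKNOWN", 3)]

-- p["name"] / p["confidence"] on the input dicts (assoc lists, first match); Pre_ guarantees
-- the lookup succeeds wherever the Python evaluates it, so the total 'getD ""' form is exact there
-- (and "" is not a priority key, so it keys to the same default 3 as Python's missing-key path).
def deduplicate_params_py (params : List (List (String × String))) : List (List (String × String)) :=
  let seen := params.foldl
    (fun (seen : PySem.Dict String (List (String × String))) p =>
      let name := (List.lookup "name" p).getD ""
      match seen.get? name with
      | none => seen.insert name p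
      | some q =>
          if pvPriority.getD ((List.lookup "confidence" p).getD "") 3 <
             pvPriority.getD ((List.lookup "confidence" q).getD "") 3
          then seen.insert name p else seen)
    PySem.Dict.empty
  seen.values

-- ===== PORT B =====
-- priority.get(p.get("confidence"), 3): a missing confidence key gives None, which is no
-- priority key, hence 3.
def pvKeyB (p : List (String × String)) : Int :=
  match List.lookup "confidence" p with
  | some c => pvPriority.getD c 3
  | none => 3

def deduplicate_params_py_alt (params : List (List (String × String))) : List (List (String × String)) :=
  let st := params.foldl
    (fun (st : PySem.Dict String (List (List (String × String))) × List String) p =>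
      let name := (List.lookup "name" p).getD ""
      match st.1.get? name with
      | some l => (st.1.insert name (l ++ [p]), st.2)
      | none => (st.1.insert name [p], st.2 ++ [name]))
    (PySem.Dict.empty, [])
  st.2.map (fun name => (PySem.List.min? (st.1.getD name []) pvKeyB).getD [])

-- ===== PRECONDITION & SPEC =====
-- Pre_ excludes exactly the inputs on which Python A raises KeyError: a param without a
-- "name" key, or a param whose name occurs at least twice but which has no "confidence" key.
def Pre_deduplicate_params_py (params : List (List (String × String))) : Prop :=
  ∀ p ∈ params, (List.lookup "name" p).isSome = true ∧
    (2 ≤ params.countP (fun q => List.lookup "name" q == List.lookup "name" p) →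
      (List.lookup "confidence" p).isSome = true)
instance (params : List (List (String × String))) : Decidable (Pre_deduplicate_params_py params) := by unfold Pre_deduplicate_params_py; infer_instance

def pvWitness_deduplicate_params_py : (List (List (String × String))) :=
  [[("name", "x"), ("confidence", "LOW")], [("name", "y")], [("name", "x"), ("confidence", "HIGH")]]

def Spec_deduplicate_params_py (params : List (List (String × String))) (out : List (List (String × String))) : Prop := out = deduplicate_params_py_alt params
instance (params : List (List (String × String))) (out : List (List (String × String))) : Decidable (Spec_deduplicate_params_py params out) := by unfold Spec_deduplicate_params_py; infer_instance

-- ===== CLAIM (what is proved, stated in full; the proofs are below) =====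
def Claim_equal_deduplicate_params_py : Prop := ∀ (params : List (List (String × String))), Dom_deduplicate_params_py params → Pre_deduplicate_params_py params → Spec_deduplicate_params_py params (deduplicate_params_py params)

-- ===== LEMMAS AND PROOFS =====

-- A's comparison key and B's key function agree on every param dict.
theorem pvKeyB_eq (p : List (String × String)) :
    pvPriority.getD ((List.lookup "confidence" p).getD "") 3 = pvKeyB p := by
  cases h : List.lookup "confidence" p
  · simp [pvKeyB, h]
    decide
  · simp [pvKeyB, h]

-- the two loop bodies, named for the proofs
def pvFA (seen : PySem.Dict String (List (String × String))) (p : List (String × String)) :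
    PySem.Dict String (List (String × String)) :=
  let name := (List.lookup "name" p).getD ""
  match seen.get? name with
  | none => seen.insert name p
  | some q =>
      if pvPriority.getD ((List.lookup "confidence" p).getD "") 3 <
         pvPriority.getD ((List.lookup "confidence" q).getD "") 3
      then seen.insert name p else seen

def pvFB (st : PySem.Dict String (List (List (String × String))) × List String)
    (p : List (String × String)) :
    PySem.Dict String (List (List (String × String))) × List String :=
  let name := (List.lookup "name" p).getD ""
  match st.1.get? name with
  | some l => (st.1.insert name (l ++ [p]), st.2)
  | none => (st.1.insert name [p], st.2 ++ [name])

-- the state invariant tying A's running-best dict to B's (groups, order) state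
def pvInv (seen : PySem.Dict String (List (String × String)))
    (groups : PySem.Dict String (List (List (String × String)))) (order : List String) : Prop :=
  groups.keys = seen.keys ∧ order = seen.keys ∧ seen.keys.Nodup ∧
  ∀ n q, seen.get? n = some q →
    ∃ l, groups.get? n = some l ∧ PySem.List.min? l pvKeyB = some q

theorem pvMin?_append (l : List (List (String × String))) (p m : List (String × String))
    (hl : PySem.List.min? l pvKeyB = some m) :
    PySem.List.min? (l ++ [p]) pvKeyB =
      if pvKeyB p < pvKeyB m then some p else some m := by
  simp only [PySem.List.min?] at hl ⊢
  rw [List.foldl_append, hl]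
  simp [List.foldl]

theorem pvInv_step (seen : PySem.Dict String (List (String × String)))
    (groups : PySem.Dict String (List (List (String × String)))) (order : List String)
    (p : List (String × String)) (h : pvInv seen groups order) :
    pvInv (pvFA seen p) (pvFB (groups, order) p).1 (pvFB (groups, order) p).2 := by
  obtain ⟨hk, ho, hnd, hm⟩ := h
  set name := (List.lookup "name" p).getD "" with hname
  cases hs : seen.get? name with
  | none =>
    have hg : groups.get? name = none := by
      rw [PySem.Dict.get?_eq_none_iff_not_mem_keys] at hs ⊢
      rw [hk]; exact hs
    have hcs : seen.contains name = false := by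
      rw [PySem.Dict.contains_eq_isSome_get?, hs]; rfl
    have hcg : groups.contains name = false := by
      rw [PySem.Dict.contains_eq_isSome_get?, hg]; rfl
    have hmem : name ∉ seen.keys := by
      rw [← PySem.Dict.get?_eq_none_iff_not_mem_keys]; exact hs
    refine ⟨?_, ?_, ?_, ?_⟩ <;> simp only [pvFA, pvFB, ← hname, hs, hg]
    · rw [PySem.Dict.keys_insert_of_not_contains _ _ hcg,
        PySem.Dict.keys_insert_of_not_contains _ _ hcs, hk]
    · rw [PySem.Dict.keys_insert_of_not_contains _ _ hcs, ho]
    · rw [PySem.Dict.keys_insert_of_not_contains _ _ hcs]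
      simp [List.nodup_append, hnd]
      exact fun a ha he => hmem (he ▸ ha)
    · intro n q hq
      by_cases hn : n = name
      · subst hn
        rw [PySem.Dict.get?_insert_self] at hq
        refine ⟨[p], PySem.Dict.get?_insert_self _ _ _, ?_⟩
        cases hq; simp [PySem.List.min?, List.foldl]
      · rw [PySem.Dict.get?_insert_of_ne _ _ hn] at hq
        obtain ⟨l, hl, hlm⟩ := hm n q hq
        exact ⟨l, by rw [PySem.Dict.get?_insert_of_ne _ _ hn]; exact hl, hlm⟩
  | some q0 =>
    obtain ⟨l0, hg, hl0m⟩ := hm name q0 hs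
    have hcs : seen.contains name = true := by
      rw [PySem.Dict.contains_eq_isSome_get?, hs]; rfl
    have hcg : groups.contains name = true := by
      rw [PySem.Dict.contains_eq_isSome_get?, hg]; rfl
    have hmin' : ∀ n q,
        (if pvKeyB p < pvKeyB q0 then seen.insert name p else seen).get? n = some q →
        ∃ l, (groups.insert name (l0 ++ [p])).get? n = some l ∧
          PySem.List.min? l pvKeyB = some q := by
      intro n q hq
      by_cases hn : n = name
      · subst hn
        refine ⟨l0 ++ [p], PySem.Dict.get?_insert_self _ _ _, ?_⟩
        rw [pvMin?_append l0 p q0 hl0m]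
        split_ifs at hq with hc
        · rw [PySem.Dict.get?_insert_self] at hq
          cases hq
          simp [hc]
        · rw [hq] at hs; cases hs
          simp [hc]
      · have hq' : seen.get? n = some q := by
          split_ifs at hq with hc
          · rwa [PySem.Dict.get?_insert_of_ne _ _ hn] at hq
          · exact hq
        obtain ⟨l, hl, hlm⟩ := hm n q hq'
        exact ⟨l, by rw [PySem.Dict.get?_insert_of_ne _ _ hn]; exact hl, hlm⟩
    refine ⟨?_, ?_, ?_, ?_⟩ <;> simp only [pvFA, pvFB, ← hname, hs, hg, pvKeyB_eq]
    · rw [PySem.Dict.keys_insert_of_contains _ _ hcg, hk]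
      split_ifs
      · rw [PySem.Dict.keys_insert_of_contains _ _ hcs]
      · rfl
    · split_ifs
      · rw [PySem.Dict.keys_insert_of_contains _ _ hcs, ho]
      · exact ho
    · split_ifs
      · rw [PySem.Dict.keys_insert_of_contains _ _ hcs]; exact hnd
      · exact hnd
    · exact hmin'

theorem pvExtract (seen : PySem.Dict String (List (String × String)))
    (groups : PySem.Dict String (List (List (String × String)))) (order : List String)
    (h : pvInv seen groups order) :
    seen.values = order.map (fun name => (PySem.List.min? (groups.getD name []) pvKeyB).getD []) := by
  obtain ⟨hk, ho, hnd, hm⟩ := h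
  rw [PySem.Dict.values_eq_map_keys seen hnd [], ho]
  apply List.map_congr_left
  intro k hkmem
  have hs : ∃ q, seen.get? k = some q := by
    cases hget : seen.get? k with
    | none => exact absurd hkmem ((PySem.Dict.get?_eq_none_iff_not_mem_keys _ _).mp hget)
    | some q => exact ⟨q, rfl⟩
  obtain ⟨q, hq⟩ := hs
  obtain ⟨l, hl, hlm⟩ := hm k q hq
  rw [PySem.Dict.getD_of_get?_eq_some _ _ hq, PySem.Dict.getD_of_get?_eq_some _ _ hl, hlm]
  rfl

theorem pvInv_fold (params : List (List (String × String)))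
    (seen : PySem.Dict String (List (String × String)))
    (groups : PySem.Dict String (List (List (String × String)))) (order : List String)
    (h : pvInv seen groups order) :
    pvInv (params.foldl pvFA seen) (params.foldl pvFB (groups, order)).1
      (params.foldl pvFB (groups, order)).2 := by
  induction params generalizing seen groups order with
  | nil => exact h
  | cons p rest ih =>
    have hstep := pvInv_step seen groups order p h
    simpa [List.foldl_cons] using ih _ _ _ hstep

-- ===== VERDICT (by name: the statement is the Claim_ definition above) =====
theorem deduplicate_params_py_spec : Claim_equal_deduplicate_params_py := by
  intro params _ _
  unfold Spec_deduplicate_params_py deduplicate_params_py deduplicate_params_py_alt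
  have hA : (fun (seen : PySem.Dict String (List (String × String))) p =>
      let name := (List.lookup "name" p).getD ""
      match seen.get? name with
      | none => seen.insert name p
      | some q =>
          if pvPriority.getD ((List.lookup "confidence" p).getD "") 3 <
             pvPriority.getD ((List.lookup "confidence" q).getD "") 3
          then seen.insert name p else seen) = pvFA := rfl
  have hB : (fun (st : PySem.Dict String (List (List (String × String))) × List String) p =>
      let name := (List.lookup "name" p).getD ""
      match st.1.get? name with
      | some l => (st.1.insert name (l ++ [p]), st.2)
      | none => (st.1.insert name [p], st.2 ++ [name])) = pvFB := rfl
  rw [hA, hB]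
  have hinv0 : pvInv PySem.Dict.empty PySem.Dict.empty [] := by
    refine ⟨rfl, rfl, List.nodup_nil, ?_⟩
    intro n q hq
    rw [PySem.Dict.get?_empty] at hq
    cases hq
  exact pvExtract _ _ _ (pvInv_fold params _ _ _ hinv0)
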